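-- pv_equiv track=rewrite | github.com/JensWilliam/midiland | tokenizer.py | _collapse_step_values
-- ===== SOURCE A (Python) =====
-- from typing import Iterable, Sequence, TypeVar
--
-- T = TypeVar("T")
--
-- def _collapse_step_values(pairs: Iterable[tuple[int, T]]) -> list[tuple[int, T]]:
--     collapsed: list[tuple[int, T]] = []
--     for step, value in sorted(pairs, key=lambda item: item[0]):
--         step_i = int(step)
--         if collapsed and collapsed[-1][0] == step_i:
--             collapsed[-1] = (step_i, value)
--         else:
--             collapsed.append((step_i, value))
--     return collapsed
-- ===== SOURCE B (Python) =====
-- from typing import Iterable, TypeVar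
--
-- T = TypeVar("T")
--
-- def _collapse_step_values(pairs: Iterable[tuple[int, T]]) -> list[tuple[int, T]]:
--     latest: dict[int, T] = {}
--     for step, value in pairs:
--         latest[int(step)] = value
--     return sorted(latest.items(), key=lambda item: item[0])
-- ===== Notes on version B (the rewrite author's own statement) =====
-- stated objective: alternative
-- what changed: Replaces sort-then-linear-scan-with-tail-overwrite by a dict built in one pass over the UNSORTED input (later occurrences overwrite), then sorting only the distinct (step, last value) items; correct because A's stable sort keeps equal steps in input order, so A's kept value is the last occurrence in the original list.
import Mathlib
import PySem

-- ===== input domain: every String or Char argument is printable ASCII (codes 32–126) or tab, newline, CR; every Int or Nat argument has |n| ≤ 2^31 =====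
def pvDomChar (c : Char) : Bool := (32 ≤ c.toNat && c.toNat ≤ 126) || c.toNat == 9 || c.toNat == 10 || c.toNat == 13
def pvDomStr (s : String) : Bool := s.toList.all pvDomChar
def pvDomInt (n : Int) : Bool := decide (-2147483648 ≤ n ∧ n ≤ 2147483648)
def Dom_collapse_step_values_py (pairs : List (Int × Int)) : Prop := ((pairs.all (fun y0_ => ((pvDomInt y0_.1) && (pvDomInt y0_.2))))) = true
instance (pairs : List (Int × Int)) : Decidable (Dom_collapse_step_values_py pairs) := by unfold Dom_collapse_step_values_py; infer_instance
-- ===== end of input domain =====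

-- B replaces A's sort-then-scan-with-tail-overwrite by a dict built in one pass over the
-- UNSORTED input (later occurrences overwrite), then sorts only the distinct items (alternative).


-- ===== PORT A =====
def collapse_step_values_py (pairs : List (Int × Int)) : List (Int × Int) :=
  (PySem.List.sorted pairs (fun item => item.1)).foldl
    (fun collapsed sv =>
      -- 'if collapsed and collapsed[-1][0] == step_i'; int(step) is the identity on Int
      if collapsed.getLast?.map Prod.fst = some sv.1 then
        collapsed.dropLast ++ [(sv.1, sv.2)]       -- collapsed[-1] = (step_i, value)
      else
        collapsed ++ [(sv.1, sv.2)])               -- collapsed.append((step_i, value))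
    []

-- ===== PORT B =====
def collapse_step_values_py_alt (pairs : List (Int × Int)) : List (Int × Int) :=
  PySem.List.sorted
    ((pairs.foldl (fun latest sv => latest.insert sv.1 sv.2)
        (PySem.Dict.empty : PySem.Dict Int Int)).items)
    (fun item => item.1)

-- ===== PRECONDITION & SPEC =====
def Spec_collapse_step_values_py (pairs : List (Int × Int)) (out : List (Int × Int)) : Prop := out = collapse_step_values_py_alt pairs
instance (pairs : List (Int × Int)) (out : List (Int × Int)) : Decidable (Spec_collapse_step_values_py pairs out) := by unfold Spec_collapse_step_values_py; infer_instance

-- ===== CLAIM (what is proved, stated in full; the proofs are below) =====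
def Claim_equal_collapse_step_values_py : Prop := ∀ (pairs : List (Int × Int)), Dom_collapse_step_values_py pairs → Spec_collapse_step_values_py pairs (collapse_step_values_py pairs)

-- ===== LEMMAS AND PROOFS =====

-- run-collapse of a sorted list: consume the run of the current key, keep its last value
def pvGrab (s v : Int) : List (Int × Int) → List (Int × Int)
  | [] => [(s, v)]
  | (s', v') :: rest => if s' = s then pvGrab s v' rest else (s, v) :: pvGrab s' v' rest

-- value at the LAST occurrence of key k in l (none if k never occurs)
def pvLastVal : List (Int × Int) → Int → Option Int
  | [], _ => none
  | q :: l, k =>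
    match pvLastVal l k with
    | some w => some w
    | none => if q.1 = k then some q.2 else none

-- A's fold over the sorted list is the run-collapse (loop invariant of A)
theorem pv_fold_grab (xs : List (Int × Int)) :
    ∀ (pre : List (Int × Int)) (s v : Int),
      xs.foldl
        (fun collapsed sv =>
          if collapsed.getLast?.map Prod.fst = some sv.1 then
            collapsed.dropLast ++ [(sv.1, sv.2)]
          else
            collapsed ++ [(sv.1, sv.2)]) (pre ++ [(s, v)])
      = pre ++ pvGrab s v xs := by
  induction xs with
  | nil => intro pre s v; simp [pvGrab]
  | cons hd tl ih =>
    intro pre s v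
    obtain ⟨s', v'⟩ := hd
    by_cases h : s' = s
    · subst h
      simp only [List.foldl_cons, pvGrab, List.getLast?_concat, Option.map_some,
        List.dropLast_concat]
      exact ih pre s' v'
    · simp only [List.foldl_cons, pvGrab, List.getLast?_concat, Option.map_some, if_neg h]
      rw [if_neg (by simpa using fun e => h e.symm), show pre ++ [(s, v)] ++ [(s', v')]
            = (pre ++ [(s, v)]) ++ [(s', v')] from rfl, ih (pre ++ [(s, v)]) s' v']
      simp

theorem pvLastVal_eq_none (l : List (Int × Int)) (k : Int) (h : ∀ q ∈ l, q.1 ≠ k) :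
    pvLastVal l k = none := by
  induction l with
  | nil => rfl
  | cons q l ih =>
    simp only [pvLastVal, ih (fun r hr => h r (List.mem_cons_of_mem _ hr))]
    exact if_neg (h q (List.mem_cons_self))

theorem pvLastVal_mem_key (l : List (Int × Int)) (k : Int) (w : Int)
    (h : pvLastVal l k = some w) : ∃ q ∈ l, q.1 = k := by
  by_contra hc
  push Not at hc
  rw [pvLastVal_eq_none l k hc] at h
  simp at h

theorem pvLastVal_cons_some {l : List (Int × Int)} {k w : Int} (q : Int × Int)
    (h : pvLastVal l k = some w) : pvLastVal (q :: l) k = some w := by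
  simp [pvLastVal, h]

theorem pvLastVal_cons_none {l : List (Int × Int)} {k : Int} (q : Int × Int)
    (h : pvLastVal l k = none) :
    pvLastVal (q :: l) k = if q.1 = k then some q.2 else none := by
  simp [pvLastVal, h]

theorem pvLastVal_cons_eq_none {l : List (Int × Int)} {k : Int} {q : Int × Int}
    (h : pvLastVal (q :: l) k = none) : q.1 ≠ k ∧ pvLastVal l k = none := by
  cases hlv : pvLastVal l k with
  | some w => rw [pvLastVal_cons_some q hlv] at h; simp at h
  | none =>
    rw [pvLastVal_cons_none q hlv] at h
    by_cases hk : q.1 = k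
    · rw [if_pos hk] at h; simp at h
    · exact ⟨hk, rfl⟩

-- the dict built by overwrite-insertion looks up the LAST occurrence
theorem pv_get_foldl_insert (l : List (Int × Int)) :
    ∀ (d : PySem.Dict Int Int) (k : Int),
      (l.foldl (fun latest sv => latest.insert sv.1 sv.2) d).get? k
        = ((pvLastVal l k).rec (d.get? k) (fun w => some w) : Option Int) := by
  induction l with
  | nil => intro d k; rfl
  | cons q l ih =>
    intro d k
    simp only [List.foldl_cons, pvLastVal, ih (d.insert q.1 q.2) k]
    cases h : pvLastVal l k with
    | some w => rfl
    | none =>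
      simp only []
      rw [PySem.Dict.get?_insert]
      by_cases hk : q.1 = k
      · simp [hk]
      · simp [hk, show ¬(k = q.1) from fun e => hk e.symm]

-- keys of the built dict are distinct
theorem pv_nodup_keys (l : List (Int × Int)) :
    ∀ (d : PySem.Dict Int Int), d.keys.Nodup →
      (l.foldl (fun latest sv => latest.insert sv.1 sv.2) d).keys.Nodup := by
  induction l with
  | nil => intro d hd; exact hd
  | cons q l ih =>
    intro d hd
    exact ih _ (PySem.Dict.nodup_keys_insert d q.1 q.2 hd)

-- pvLastVal only depends on the entries with key k
theorem pvLastVal_filter (l : List (Int × Int)) (k : Int) :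
    pvLastVal (l.filter (fun p => p.1 == k)) k = pvLastVal l k := by
  induction l with
  | nil => rfl
  | cons q l ih =>
    by_cases hk : q.1 = k
    · simp only [List.filter_cons, hk, beq_self_eq_true, if_true, pvLastVal, ih]
    · have hb : (q.1 == k) = false := beq_false_of_ne hk
      rw [List.filter_cons, hb]
      simp only [Bool.false_eq_true, if_false, ih]
      cases h : pvLastVal l k with
      | some w => simp [pvLastVal, h]
      | none => simp [pvLastVal, h, hk]

-- STABILITY of the insertion step: inserting into an already key-sorted list puts x after
-- every entry with the same key
theorem pv_filter_insertBy (k : Int) (x : Int × Int) :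
    ∀ (ys : List (Int × Int)), List.Pairwise (fun a b => a.1 ≤ b.1) ys →
      (PySem.List.insertBy (fun a b => decide (a.1 < b.1)) x ys).filter (fun p => p.1 == k)
        = ys.filter (fun p => p.1 == k) ++ (if x.1 == k then [x] else []) := by
  intro ys
  induction ys with
  | nil =>
    intro _
    by_cases h : x.1 = k <;> simp [PySem.List.insertBy, h]
  | cons y ys ih =>
    intro hp
    rw [List.pairwise_cons] at hp
    show (if (decide (x.1 < y.1)) = true then x :: y :: ys
          else y :: PySem.List.insertBy (fun a b => decide (a.1 < b.1)) x ys).filter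
            (fun p => p.1 == k) = _
    by_cases hlt : x.1 < y.1
    · simp only [hlt, decide_true, if_true]
      by_cases hxk : x.1 = k
      · -- every entry of y :: ys has key ≥ y.1 > x.1 = k, so its filter is empty
        have hemp : (y :: ys).filter (fun p => p.1 == k) = [] := by
          rw [List.filter_eq_nil_iff]
          intro q hq
          have : y.1 ≤ q.1 := by
            rcases List.mem_cons.mp hq with h | h
            · rw [h]
            · exact hp.1 q h
          simp only [beq_iff_eq]
          omega
        rw [hemp]
        simp [hxk, hemp]
      · have hx : (x.1 == k) = false := beq_false_of_ne hxk
        simp [List.filter_cons, hx]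
    · simp only [hlt, decide_false, Bool.false_eq_true, if_false, List.filter_cons]
      rw [ih hp.2]
      cases hyk : (y.1 == k) <;> simp

-- STABILITY of A's sort: the entries with key k appear in it exactly as in the input
theorem pv_filter_sorted (pairs : List (Int × Int)) (k : Int) :
    (PySem.List.sorted pairs (fun item => item.1)).filter (fun p => p.1 == k)
      = pairs.filter (fun p => p.1 == k) := by
  induction pairs using List.reverseRecOn with
  | nil => rfl
  | append_singleton l x ih =>
    rw [PySem.List.sorted_eq_foldl_insertBy, List.foldl_append, List.foldl_cons,
      List.foldl_nil, ← PySem.List.sorted_eq_foldl_insertBy,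
      pv_filter_insertBy k x _ (PySem.List.sorted_pairwise l (fun item => item.1)), ih,
      List.filter_append]
    cases h : (x.1 == k) <;> simp [h]

-- membership in the run-collapse of a key-sorted list = "last value of that key"
theorem pv_mem_grab (p : Int × Int) :
    ∀ (rest : List (Int × Int)) (s v : Int),
      List.Pairwise (fun a b => a.1 ≤ b.1) ((s, v) :: rest) →
      (p ∈ pvGrab s v rest ↔ pvLastVal ((s, v) :: rest) p.1 = some p.2) := by
  intro rest
  induction rest with
  | nil =>
    intro s v _
    constructor
    · intro h
      rcases List.mem_singleton.mp h with h
      subst h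
      simp [pvLastVal]
    · intro h
      simp only [pvLastVal] at h
      by_cases hk : s = p.1
      · simp only [hk, if_true, Option.some.injEq] at h
        simp [pvGrab, Prod.ext_iff, hk.symm, h]
      · simp [hk] at h
  | cons q rest ih =>
    intro s v hp
    obtain ⟨s', v'⟩ := q
    have hp' : List.Pairwise (fun a b => a.1 ≤ b.1) ((s', v') :: rest) :=
      (List.pairwise_cons.mp hp).2
    by_cases h : s' = s
    · subst h
      rw [show pvGrab s' v ((s', v') :: rest) = pvGrab s' v' rest from if_pos rfl,
        ih s' v' hp']
      -- the earlier (s', v) entry is shadowed by the (s', v') one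
      have key : pvLastVal ((s', v) :: (s', v') :: rest) p.1
          = pvLastVal ((s', v') :: rest) p.1 := by
        cases hlv : pvLastVal ((s', v') :: rest) p.1 with
        | some w => exact pvLastVal_cons_some _ hlv
        | none =>
          obtain ⟨hne, _⟩ := pvLastVal_cons_eq_none hlv
          rw [pvLastVal_cons_none _ hlv]
          simp [hne]
      rw [key]
    · rw [show pvGrab s v ((s', v') :: rest) = (s, v) :: pvGrab s' v' rest from if_neg h]
      have hss' : s < s' := lt_of_le_of_ne
        ((List.pairwise_cons.mp hp).1 (s', v') List.mem_cons_self) (fun e => h e.symm)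
      have hkeys : ∀ q ∈ (s', v') :: rest, s < q.1 := by
        intro q hq
        rcases List.mem_cons.mp hq with h1 | h1
        · rw [h1]; exact hss'
        · exact lt_of_lt_of_le hss' ((List.pairwise_cons.mp hp').1 q h1)
      have hnone : pvLastVal ((s', v') :: rest) s = none :=
        pvLastVal_eq_none _ _ (fun q hq => ne_of_gt (hkeys q hq))
      constructor
      · intro h2
        rcases List.mem_cons.mp h2 with h2 | h2
        · rw [h2]
          show pvLastVal ((s, v) :: (s', v') :: rest) s = some v
          rw [pvLastVal_cons_none _ hnone]
          simp
        · exact pvLastVal_cons_some _ ((ih s' v' hp').mp h2)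
      · intro h2
        cases hlv : pvLastVal ((s', v') :: rest) p.1 with
        | some w =>
          have hw := pvLastVal_cons_some (q := (s, v)) hlv
          rw [hw] at h2
          exact List.mem_cons_of_mem _
            ((ih s' v' hp').mpr (hlv.trans ((Option.some.injEq _ _).mpr
              ((Option.some.injEq _ _).mp h2))))
        | none =>
          rw [pvLastVal_cons_none _ hlv] at h2
          by_cases hk : s = p.1
          · rw [if_pos hk] at h2
            have hp2 : p = (s, v) := by
              obtain ⟨a, b⟩ := p
              injection h2 with hv
              simp only at hk hv ⊢
              rw [← hk, ← hv]
            rw [hp2]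
            exact List.mem_cons_self
          · rw [if_neg hk] at h2
            simp at h2

-- the run-collapse of a key-sorted list has strictly increasing keys
theorem pv_grab_pairwise :
    ∀ (rest : List (Int × Int)) (s v : Int),
      List.Pairwise (fun a b => a.1 ≤ b.1) ((s, v) :: rest) →
      List.Pairwise (fun a b => a.1 < b.1) (pvGrab s v rest) := by
  intro rest
  induction rest with
  | nil => intro s v _; simp [pvGrab]
  | cons q rest ih =>
    intro s v hp
    obtain ⟨s', v'⟩ := q
    have hp' : List.Pairwise (fun a b => a.1 ≤ b.1) ((s', v') :: rest) :=
      (List.pairwise_cons.mp hp).2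
    by_cases h : s' = s
    · subst h
      rw [show pvGrab s' v ((s', v') :: rest) = pvGrab s' v' rest from if_pos rfl]
      exact ih s' v' hp'
    · rw [show pvGrab s v ((s', v') :: rest) = (s, v) :: pvGrab s' v' rest from if_neg h]
      have hss' : s < s' := lt_of_le_of_ne ((List.pairwise_cons.mp hp).1 (s', v') List.mem_cons_self) (fun e => h e.symm)
      have hkeys : ∀ q ∈ (s', v') :: rest, s < q.1 := by
        intro q hq
        rcases List.mem_cons.mp hq with h1 | h1
        · rw [h1]; exact hss'
        · exact lt_of_lt_of_le hss' ((List.pairwise_cons.mp hp').1 q h1)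
      refine List.pairwise_cons.mpr ⟨?_, ih s' v' hp'⟩
      intro q hq
      have := (pv_mem_grab q rest s' v' hp').mp hq
      obtain ⟨r, hr, hrk⟩ := pvLastVal_mem_key _ _ _ this
      rw [← hrk]
      exact hkeys r hr

-- ===== VERDICT (by name: the statement is the Claim_ definition above) =====
theorem collapse_step_values_py_spec : Claim_equal_collapse_step_values_py := by
  intro pairs _
  unfold Spec_collapse_step_values_py collapse_step_values_py collapse_step_values_py_alt
  cases hL : PySem.List.sorted pairs (fun item => item.1) with
  | nil =>
    have : pairs = [] := (PySem.List.sorted_eq_nil_iff pairs _ false).mp hL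
    subst this
    rfl
  | cons hd tl =>
    obtain ⟨s, v⟩ := hd
    rw [show ([] : List (Int × Int)) = [] ++ [] from rfl]
    rw [show List.foldl _ ([] ++ []) ((s, v) :: tl)
          = List.foldl (fun collapsed sv =>
              if collapsed.getLast?.map Prod.fst = some sv.1 then
                collapsed.dropLast ++ [(sv.1, sv.2)]
              else collapsed ++ [(sv.1, sv.2)]) ([] ++ [(s, v)]) tl from by simp]
    rw [pv_fold_grab tl [] s v, List.nil_append]
    -- B's sorted dict items equal the run-collapse, by uniqueness of the strictly sorted rearrangement
    have hsp : List.Pairwise (fun (a b : Int × Int) => a.1 ≤ b.1) ((s, v) :: tl) := by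
      rw [← hL]; exact PySem.List.sorted_pairwise pairs (fun item => item.1)
    set d := pairs.foldl (fun latest sv => latest.insert sv.1 sv.2)
        (PySem.Dict.empty : PySem.Dict Int Int) with hd
    have hnk : d.keys.Nodup := pv_nodup_keys pairs _ PySem.Dict.nodup_keys_empty
    have hmemd : ∀ p : Int × Int, p ∈ d.items ↔ pvLastVal pairs p.1 = some p.2 := by
      intro p
      rw [← PySem.Dict.get?_eq_some_iff_mem_items d p.1 p.2 hnk, hd,
        pv_get_foldl_insert pairs PySem.Dict.empty p.1]
      cases h : pvLastVal pairs p.1 with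
      | some w => simp
      | none => simp [PySem.Dict.get?_empty]
    have hmemg : ∀ p : Int × Int, p ∈ pvGrab s v tl ↔ pvLastVal pairs p.1 = some p.2 := by
      intro p
      rw [pv_mem_grab p tl s v hsp, ← hL, ← pvLastVal_filter _ p.1, pv_filter_sorted,
        pvLastVal_filter]
    have hndg : (pvGrab s v tl).Nodup := by
      have := pv_grab_pairwise tl s v hsp
      exact List.Pairwise.imp (fun h => by intro e; subst e; exact lt_irrefl _ h) this
    have hndd : d.items.Nodup := by
      have : d.items.map Prod.fst = d.keys := rfl
      exact List.Nodup.of_map Prod.fst (this ▸ hnk)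
    have hperm : (pvGrab s v tl).Perm d.items :=
      (List.perm_ext_iff_of_nodup hndg hndd).mpr
        (fun p => (hmemg p).trans (hmemd p).symm)
    exact (PySem.List.sorted_eq_of_perm_of_pairwise_lt d.items (pvGrab s v tl)
      (fun item => item.1) hperm (pv_grab_pairwise tl s v hsp)).symm
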